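-- pv_equiv track=rewrite | github.com/ak43zhang/gs2026 | src/gs2026/dashboard2/services/pdf_reader.py | _split_by_lines
-- ===== SOURCE A (Python) =====
-- from typing import List, Dict, Optional
--
-- def _split_by_lines(text: str) -> List[str]:
--     """按行分割策略"""
--     lines = text.split('\n')
--     result = []
--     pending_line = ""
--
--     for line in lines:
--         line = line.strip()
--         if not line:
--             continue
--
--         # 处理以 * 开头的行（如 *ST赛隆），与前一行合并
--         if line.startswith('*') and pending_line:
--             pending_line = pending_line + line
--             continue
--
--         # 如果当前行以 * 开头，暂存等待合并
--         if line.startswith('*'):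
--             pending_line = line
--             continue
--
--         # 保存之前的待处理行
--         if pending_line:
--             if len(pending_line) >= 3:
--                 result.append(pending_line)
--             pending_line = ""
--
--         # 处理当前行
--         if len(line) >= 3:
--             result.append(line)
--
--     # 处理最后的待处理行
--     if pending_line and len(pending_line) >= 3:
--         result.append(pending_line)
--
--     return result if result else [text]
-- ===== SOURCE B (Python) =====
-- def _split_by_lines(text):
--     """按行分割策略"""
--     cl = [s for s in (ln.strip() for ln in text.split('\n')) if s]
--     result = []
--     i = 0
--     n = len(cl)
--     while i < n:
--         if cl[i].startswith('*'):
--             j = i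
--             while j < n and cl[j].startswith('*'):
--                 j += 1
--             blob = "".join(cl[i:j])
--             if len(blob) >= 3:
--                 result.append(blob)
--             i = j
--         else:
--             if len(cl[i]) >= 3:
--                 result.append(cl[i])
--             i += 1
--     return result if result else [text]
-- ===== Notes on version B (the rewrite author's own statement) =====
-- stated objective: alternative
-- what changed: Replaces A's single pass with a mutable pending-line accumulator by a two-phase run-grouping scan: first clean (strip + drop empties) all lines, then walk the cleaned list grouping maximal runs of '*'-lines and joining each run into one blob, emitting blobs and plain lines of length >= 3.
import Mathlib
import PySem

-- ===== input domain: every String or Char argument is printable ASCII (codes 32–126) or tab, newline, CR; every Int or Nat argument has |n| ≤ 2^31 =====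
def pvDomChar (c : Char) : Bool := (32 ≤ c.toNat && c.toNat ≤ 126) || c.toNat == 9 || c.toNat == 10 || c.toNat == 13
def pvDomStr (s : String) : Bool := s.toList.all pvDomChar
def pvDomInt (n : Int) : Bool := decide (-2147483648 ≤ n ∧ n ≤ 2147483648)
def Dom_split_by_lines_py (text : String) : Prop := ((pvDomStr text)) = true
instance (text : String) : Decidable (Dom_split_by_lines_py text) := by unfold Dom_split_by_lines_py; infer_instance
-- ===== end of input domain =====

-- B replaces A's one-pass pending-accumulator scan by a two-phase run-grouping scan
-- (clean all lines first, then group maximal runs of '*'-lines); alternative decomposition, same cost.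


-- ===== PORT A =====
-- the for-loop of _split_by_lines, carrying (result, pending_line)
def splitA_loop : List String → List String → String → List String × String
  | [], result, pending => (result, pending)
  | line0 :: rest, result, pending =>
    let line := PySem.Str.strip line0
    if line = "" then
      splitA_loop rest result pending
    else if PySem.Str.startswith line "*" = true ∧ pending ≠ "" then
      splitA_loop rest result (pending ++ line)
    else if PySem.Str.startswith line "*" = true then
      splitA_loop rest result line
    else
      let result1 := if pending ≠ "" then
          (if 3 ≤ PySem.Str.len pending then result ++ [pending] else result)
        else result
      let result2 := if 3 ≤ PySem.Str.len line then result1 ++ [line] else result1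
      splitA_loop rest result2 ""

def split_by_lines_py (text : String) : List String :=
  let lines := (PySem.Str.split? text "\n").getD []   -- sep "\n" ≠ "", so split? never returns none
  let st := splitA_loop lines [] ""
  let result := if st.2 ≠ "" ∧ 3 ≤ PySem.Str.len st.2 then st.1 ++ [st.2] else st.1
  if result ≠ [] then result else [text]

-- ===== PORT B =====
def isStar (s : String) : Bool := PySem.Str.startswith s "*"

def pick3 (s : String) : List String := if 3 ≤ PySem.Str.len s then [s] else []

-- the while-loop of B: group maximal runs of '*'-lines, emit blobs / plain lines of length ≥ 3
def groupRuns : List String → List String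
  | [] => []
  | l :: rest =>
    if isStar l then
      pick3 (PySem.Str.join "" (l :: rest.takeWhile isStar)) ++ groupRuns (rest.dropWhile isStar)
    else
      pick3 l ++ groupRuns rest
termination_by cl => cl.length
decreasing_by
  · exact Nat.lt_succ_of_le (List.length_dropWhile_le _ _)
  · exact Nat.lt_succ_of_le (Nat.le_refl _)

def split_by_lines_py_alt (text : String) : List String :=
  let cl := (((PySem.Str.split? text "\n").getD []).map PySem.Str.strip).filter (fun s => s ≠ "")
  let result := groupRuns cl
  if result ≠ [] then result else [text]

-- ===== PRECONDITION & SPEC =====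
def Spec_split_by_lines_py (text : String) (out : List String) : Prop := out = split_by_lines_py_alt text
instance (text : String) (out : List String) : Decidable (Spec_split_by_lines_py text out) := by unfold Spec_split_by_lines_py; infer_instance

-- ===== CLAIM (what is proved, stated in full; the proofs are below) =====
def Claim_equal_split_by_lines_py : Prop := ∀ (text : String), Dom_split_by_lines_py text → Spec_split_by_lines_py text (split_by_lines_py text)

-- ===== LEMMAS AND PROOFS =====

-- proof-side characterisation of A's loop result on the CLEANED line list:
-- p is the pending '*'-blob accumulated so far
def emitE (p : String) : List String → List String
  | [] => pick3 p
  | l :: rest => if isStar l then emitE (p ++ l) rest else pick3 p ++ pick3 l ++ emitE "" rest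

theorem pick3_empty : pick3 "" = [] := by decide

theorem flush_eq (r : List String) (p : String) :
    (if p ≠ "" ∧ 3 ≤ PySem.Str.len p then r ++ [p] else r) = r ++ pick3 p := by
  by_cases hp : p = ""
  · subst hp; simp [pick3_empty]
  · simp only [pick3, hp, ne_eq, not_false_iff, true_and]
    split <;> simp

theorem acc_eq (res : List String) (p line : String) :
    (if 3 ≤ PySem.Str.len line then
        (if p ≠ "" then (if 3 ≤ PySem.Str.len p then res ++ [p] else res) else res) ++ [line]
      else (if p ≠ "" then (if 3 ≤ PySem.Str.len p then res ++ [p] else res) else res))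
    = res ++ pick3 p ++ pick3 line := by
  have h1 : (if p ≠ "" then (if 3 ≤ PySem.Str.len p then res ++ [p] else res) else res)
      = res ++ pick3 p := by
    by_cases hp : p = ""
    · simp [hp, pick3_empty]
    · simp only [hp, ne_eq, not_false_iff, if_pos, pick3]
      split <;> simp
  rw [h1]
  unfold pick3
  split <;> simp [List.append_assoc]

theorem loopE (lines : List String) : ∀ (res : List String) (p : String),
    (if (splitA_loop lines res p).2 ≠ "" ∧ 3 ≤ PySem.Str.len (splitA_loop lines res p).2 then
        (splitA_loop lines res p).1 ++ [(splitA_loop lines res p).2]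
      else (splitA_loop lines res p).1)
    = res ++ emitE p ((lines.map PySem.Str.strip).filter (fun s => s ≠ "")) := by
  induction lines with
  | nil => intro res p; simpa [splitA_loop, emitE] using flush_eq res p
  | cons l0 rest ih =>
    intro res p
    by_cases h0 : PySem.Str.strip l0 = ""
    · simp only [splitA_loop]
      rw [if_pos h0]
      simpa [h0] using ih res p
    · have hfil : (((l0 :: rest).map PySem.Str.strip).filter (fun s => s ≠ ""))
          = PySem.Str.strip l0 :: ((rest.map PySem.Str.strip).filter (fun s => s ≠ "")) := by
        simp [h0]
      rw [hfil]
      by_cases hs : PySem.Str.startswith (PySem.Str.strip l0) "*" = true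
      · have hsb : isStar (PySem.Str.strip l0) = true := hs
        by_cases hp : p = ""
        · subst hp
          simp only [splitA_loop]
          rw [if_neg h0,
            if_neg (show ¬(PySem.Str.startswith (PySem.Str.strip l0) "*" = true ∧ ("" : String) ≠ "")
              from fun hh => hh.2 rfl),
            if_pos hs]
          simp only [emitE]
          rw [if_pos hsb, String.empty_append]
          exact ih res (PySem.Str.strip l0)
        · simp only [splitA_loop]
          rw [if_neg h0,
            if_pos (show PySem.Str.startswith (PySem.Str.strip l0) "*" = true ∧ p ≠ "" from ⟨hs, hp⟩)]
          simp only [emitE]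
          rw [if_pos hsb]
          exact ih res (p ++ PySem.Str.strip l0)
      · have hsb : ¬(isStar (PySem.Str.strip l0) = true) := hs
        simp only [splitA_loop]
        rw [if_neg h0,
          if_neg (show ¬(PySem.Str.startswith (PySem.Str.strip l0) "*" = true ∧ p ≠ "")
            from fun hh => hs hh.1),
          if_neg hs]
        simp only [emitE]
        rw [if_neg hsb, ih _ "", acc_eq res p (PySem.Str.strip l0)]
        simp [List.append_assoc]

theorem flatten_intersperse_nil (xss : List (List Char)) :
    (List.intersperse ([] : List Char) xss).flatten = xss.flatten := by
  induction xss with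
  | nil => rfl
  | cons a t ih =>
    cases t with
    | nil => rfl
    | cons b t2 => simp only [List.intersperse_cons₂] at ih ⊢; simp [ih]

theorem join_empty_nil : PySem.Str.join "" ([] : List String) = "" := by decide

theorem join_empty_cons (c : String) (cs : List String) :
    PySem.Str.join "" (c :: cs) = c ++ PySem.Str.join "" cs := by
  simp only [PySem.Str.join, PySem.Chars.join, List.intercalate, List.map_cons]
  rw [show ("" : String).toList = ([] : List Char) from rfl]
  rw [flatten_intersperse_nil, flatten_intersperse_nil, List.flatten_cons,
    String.ofList_append, String.ofList_toList]

theorem emitE_run (n : Nat) : ∀ (cl : List String), cl.length ≤ n → ∀ (p : String),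
    emitE p cl = pick3 (p ++ PySem.Str.join "" (cl.takeWhile isStar)) ++ groupRuns (cl.dropWhile isStar) := by
  induction n with
  | zero =>
    intro cl hcl p
    have : cl = [] := List.eq_nil_of_length_eq_zero (Nat.le_zero.mp hcl)
    subst this
    simp [emitE, groupRuns, join_empty_nil]
  | succ n ih =>
    intro cl hcl p
    cases cl with
    | nil => simp [emitE, groupRuns, join_empty_nil]
    | cons l rest =>
      have hrest : rest.length ≤ n := Nat.lt_succ_iff.mp hcl
      by_cases hl : isStar l = true
      · simp only [emitE, List.takeWhile_cons_of_pos hl, List.dropWhile_cons_of_pos hl]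
        rw [if_pos hl, ih rest hrest (p ++ l), join_empty_cons, String.append_assoc]
      · have hE : emitE "" rest = groupRuns rest := by
          rw [ih rest hrest ""]
          cases rest with
          | nil => simp [groupRuns, pick3_empty, join_empty_nil]
          | cons m rs =>
            by_cases hm : isStar m = true
            · simp only [List.takeWhile_cons_of_pos hm, List.dropWhile_cons_of_pos hm]
              rw [String.empty_append]
              rw [groupRuns]
              simp [hm]
            · simp only [List.takeWhile_cons_of_neg (by simpa using hm),
                List.dropWhile_cons_of_neg (by simpa using hm)]
              simp [join_empty_nil, pick3_empty]
        simp only [emitE,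
          List.takeWhile_cons_of_neg (by simpa using hl),
          List.dropWhile_cons_of_neg (by simpa using hl)]
        rw [if_neg hl, hE, groupRuns]
        simp [hl, join_empty_nil, List.append_assoc]

theorem emitE_groupRuns (cl : List String) : emitE "" cl = groupRuns cl := by
  rw [emitE_run cl.length cl (Nat.le_refl _) ""]
  cases cl with
  | nil => simp [groupRuns, pick3_empty, join_empty_nil]
  | cons m rs =>
    by_cases hm : isStar m = true
    · simp only [List.takeWhile_cons_of_pos hm, List.dropWhile_cons_of_pos hm]
      rw [String.empty_append]
      rw [groupRuns]
      simp [hm]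
    · simp only [List.takeWhile_cons_of_neg (by simpa using hm),
        List.dropWhile_cons_of_neg (by simpa using hm)]
      simp [join_empty_nil, pick3_empty]

-- ===== VERDICT (by name: the statement is the Claim_ definition above) =====
theorem split_by_lines_py_spec : Claim_equal_split_by_lines_py := by
  intro text _
  unfold Spec_split_by_lines_py
  have h := loopE ((PySem.Str.split? text "\n").getD []) [] ""
  simp only [List.nil_append] at h
  simp only [split_by_lines_py, split_by_lines_py_alt]
  rw [h, emitE_groupRuns]
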